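-- pv_equiv track=rewrite | github.com/wolfthread/shakespeare-quotes-generator | __main__.py | clean_up_scenes
-- ===== SOURCE A (Python) =====
-- def removing_braquets(l):
--     no_braquets = ''
--     if "[" in l and "]" in l:
--         start = l.index('[')
--         stop = l.index(']') + 1
--         no_braquets = l[0:start] + l[stop:]
--     elif "[" in l:
--         start = l.index('[')
--         no_braquets = l[0:start]
--     elif "]" in l:
--         position = l.index("]") + 1
--         no_braquets = l[position:]
--     if l is not None:
--         return no_braquets.strip()
--     else:
--         return ''
--
-- def clean_up_line(l):
--     cleaned = ''
--     # checking for "=" char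
--     if not "=" in l:
--         l = l.split()
--         for word in l:
--             if not word.isupper():
--                 cleaned += word + ' '
--         # Cleaning braquets
--         if ("]" in cleaned or "[" in cleaned):
--             cleaned = removing_braquets(cleaned)
--         cleaned = cleaned.strip()
--     if len(cleaned) > 0:
--         cleaned = cleaned[0].lower()+cleaned[1:]
--     return cleaned
--
-- def clean_up_scenes(scene, min):
--     cleaned_up_scene = []
--     complete_sentence = ''
--     for line in scene:
--         line = clean_up_line(line)
--         for letter in line:
--             complete_sentence += letter
--             if letter == '.' or letter == '?' or letter == '!':
--                 if len(complete_sentence) >= min: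
--                     if complete_sentence[0].isdigit():
--                         complete_sentence = complete_sentence[1:]
--                     cleaned_up_scene.append((complete_sentence).strip())
--                     complete_sentence = ''
--         complete_sentence += ' '
--     return cleaned_up_scene
-- ===== SOURCE B (Python) =====
-- def removing_braquets(l):
--     no_braquets = ''
--     if "[" in l and "]" in l:
--         start = l.index('[')
--         stop = l.index(']') + 1
--         no_braquets = l[0:start] + l[stop:]
--     elif "[" in l:
--         start = l.index('[')
--         no_braquets = l[0:start]
--     elif "]" in l:
--         position = l.index("]") + 1
--         no_braquets = l[position:]
--     if l is not None:
--         return no_braquets.strip()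
--     else:
--         return ''
--
-- def clean_up_line(l):
--     cleaned = ''
--     if not "=" in l:
--         l = l.split()
--         for word in l:
--             if not word.isupper():
--                 cleaned += word + ' '
--         if ("]" in cleaned or "[" in cleaned):
--             cleaned = removing_braquets(cleaned)
--         cleaned = cleaned.strip()
--     if len(cleaned) > 0:
--         cleaned = cleaned[0].lower() + cleaned[1:]
--     return cleaned
--
-- def clean_up_scenes(scene, min):
--     # Join the cleaned lines once, then cut at sentence terminators by index,
--     # taking each sentence as a single slice of the joined text.
--     text = ''.join(clean_up_line(line) + ' ' for line in scene)
--     cuts = [i for i, ch in enumerate(text) if ch in '.?!']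
--     out = []
--     prev = 0
--     for c in cuts:
--         if c + 1 - prev >= min:
--             seg = text[prev:c + 1]
--             if seg[0].isdigit():
--                 seg = seg[1:]
--             out.append(seg.strip())
--             prev = c + 1
--     return out
-- ===== Notes on version B (the rewrite author's own statement) =====
-- stated objective: alternative
-- what changed: B joins all cleaned lines into one text, collects the terminator positions once, and emits each sentence as a single slice between cut indices, instead of A's nested per-line per-character loop that grows a buffer one character at a time.
import Mathlib
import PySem

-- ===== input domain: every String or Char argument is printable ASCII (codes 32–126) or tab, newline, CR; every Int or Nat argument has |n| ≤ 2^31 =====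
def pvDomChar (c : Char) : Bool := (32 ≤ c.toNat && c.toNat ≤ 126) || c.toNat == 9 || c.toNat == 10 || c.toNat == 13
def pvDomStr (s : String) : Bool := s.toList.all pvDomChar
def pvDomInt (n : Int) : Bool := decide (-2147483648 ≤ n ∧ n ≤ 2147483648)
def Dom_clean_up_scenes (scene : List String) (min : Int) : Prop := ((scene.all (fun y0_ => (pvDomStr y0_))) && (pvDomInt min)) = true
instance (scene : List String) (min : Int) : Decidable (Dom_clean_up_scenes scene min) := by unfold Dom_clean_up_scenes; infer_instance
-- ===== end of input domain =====

-- B joins the cleaned lines once and cuts the joined text at terminator indices with slices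
-- (one pass over precomputed cut positions) instead of A's character-by-character buffer loop; objective: alternative decomposition.

-- ===== PORT A =====
-- str.isupper, exact on ASCII (cased characters are exactly the letters): at least one
-- cased character and no lowercase one.
def pyIsupper (cs : List Char) : Bool := cs.any PySem.Chars.isalpha && !cs.any PySem.Chars.islower

-- removing_braquets; 'l.index' is guarded by 'in', so PySem.Chars.find is ≥ 0 there and
-- the slices have nonnegative bounds (take/drop); 'if l is not None' is always true.
def removing_braquets (l : List Char) : List Char :=
  let no_braquets : List Char := []
  let no_braquets :=
    if PySem.Chars.isIn ['['] l && PySem.Chars.isIn [']'] l then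
      let start := (PySem.Chars.find l ['[']).toNat
      let stop := (PySem.Chars.find l [']']).toNat + 1
      l.take start ++ l.drop stop
    else if PySem.Chars.isIn ['['] l then
      l.take (PySem.Chars.find l ['[']).toNat
    else if PySem.Chars.isIn [']'] l then
      l.drop ((PySem.Chars.find l [']']).toNat + 1)
    else no_braquets
  PySem.Chars.strip no_braquets

def clean_up_line (l : String) : String :=
  let cleaned : List Char := []
  let cleaned :=
    if PySem.Str.isIn "=" l then cleaned
    else
      let ws := PySem.Str.split₀ l
      let cleaned := ws.foldl (fun acc w => if !pyIsupper w.toList then acc ++ w.toList ++ [' '] else acc) cleaned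
      let cleaned :=
        if PySem.Chars.isIn [']'] cleaned || PySem.Chars.isIn ['['] cleaned then
          removing_braquets cleaned
        else cleaned
      PySem.Chars.strip cleaned
  let cleaned :=
    if 0 < cleaned.length then PySem.Chars.lowerChar (cleaned.headD ' ') :: cleaned.drop 1
    else cleaned
  String.mk cleaned

-- the body of A's inner 'for letter in line' loop; complete_sentence[0] is safe (the
-- buffer just received a character), ported as headD.
def pvAStep (min : Int) (st : List String × List Char) (c : Char) : List String × List Char :=
  let buf := st.2 ++ [c]
  if c == '.' || c == '?' || c == '!' then
    if min ≤ (buf.length : Int) then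
      let buf := if PySem.Chars.isdigit (buf.headD ' ') then buf.drop 1 else buf
      (st.1 ++ [String.mk (PySem.Chars.strip buf)], [])
    else (st.1, buf)
  else (st.1, buf)

def clean_up_scenes (scene : List String) (min : Int) : List String :=
  (scene.foldl
      (fun st line =>
        let st2 := (clean_up_line line).toList.foldl (pvAStep min) st
        (st2.1, st2.2 ++ [' ']))
      (([], []) : List String × List Char)).1

-- ===== PORT B =====
-- the body of B's 'for c in cuts' loop; state = (out, prev); seg[0] is safe (prev ≤ c).
def pvBStep (text : List Char) (min : Int) (st : List String × Int) (c : Int) : List String × Int :=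
  if min ≤ c + 1 - st.2 then
    let seg := PySem.List.slice text (some st.2) (some (c + 1))
    let seg := if PySem.Chars.isdigit (seg.headD ' ') then seg.drop 1 else seg
    (st.1 ++ [String.mk (PySem.Chars.strip seg)], c + 1)
  else st

def clean_up_scenes_alt (scene : List String) (min : Int) : List String :=
  let text := scene.foldl (fun acc line => acc ++ ((clean_up_line line).toList ++ [' '])) ([] : List Char)
  let cuts := ((PySem.List.enumerate text).filter (fun p => p.2 == '.' || p.2 == '?' || p.2 == '!')).map (·.1)
  (cuts.foldl (pvBStep text min) (([] : List String), (0 : Int))).1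

-- ===== PRECONDITION & SPEC =====
def Spec_clean_up_scenes (scene : List String) (min : Int) (out : List String) : Prop := out = clean_up_scenes_alt scene min
instance (scene : List String) (min : Int) (out : List String) : Decidable (Spec_clean_up_scenes scene min out) := by unfold Spec_clean_up_scenes; infer_instance

-- ===== CLAIM (what is proved, stated in full; the proofs are below) =====
def Claim_equal_clean_up_scenes : Prop := ∀ (scene : List String) (min : Int), Dom_clean_up_scenes scene min → Spec_clean_up_scenes scene min (clean_up_scenes scene min)

-- ===== LEMMAS AND PROOFS =====

-- the common sentence-splitting recursion both ports are reduced to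
def pvSent (min : Int) (buf : List Char) : List Char → List String
  | [] => []
  | c :: rest =>
    if c == '.' || c == '?' || c == '!' then
      if min ≤ ((buf.length : Int) + 1) then
        String.mk (PySem.Chars.strip
            (if PySem.Chars.isdigit ((buf ++ [c]).headD ' ') then (buf ++ [c]).drop 1 else buf ++ [c]))
          :: pvSent min [] rest
      else pvSent min (buf ++ [c]) rest
    else pvSent min (buf ++ [c]) rest

-- positions (from offset k) of the terminator characters of a text
def pvCuts (k : Nat) : List Char → List Nat
  | [] => []
  | c :: t => if c == '.' || c == '?' || c == '!' then k :: pvCuts (k + 1) t else pvCuts (k + 1) t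

theorem pvAStep_space (min : Int) (st : List String × List Char) :
    pvAStep min st ' ' = (st.1, st.2 ++ [' ']) := by
  cases st; rfl

theorem pvAStep_foldl (min : Int) (cs : List Char) :
    ∀ (out : List String) (buf : List Char),
      (cs.foldl (pvAStep min) (out, buf)).1 = out ++ pvSent min buf cs := by
  induction cs with
  | nil => intro out buf; simp [pvSent]
  | cons c rest ih =>
    intro out buf
    by_cases hterm : (c == '.' || c == '?' || c == '!') = true
    · by_cases hlen : min ≤ ((buf.length : Int) + 1)
      · have : pvAStep min (out, buf) c =
            (out ++ [String.mk (PySem.Chars.strip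
              (if PySem.Chars.isdigit ((buf ++ [c]).headD ' ') then (buf ++ [c]).drop 1 else buf ++ [c]))], []) := by
          simp [pvAStep, hterm, hlen]
        simp [List.foldl_cons, this, ih, pvSent, hterm, hlen]
      · have : pvAStep min (out, buf) c = (out, buf ++ [c]) := by
          simp [pvAStep, hterm, hlen]
        simp [List.foldl_cons, this, ih, pvSent, hterm, hlen]
    · have : pvAStep min (out, buf) c = (out, buf ++ [c]) := by
        simp [pvAStep, hterm]
      simp [List.foldl_cons, this, ih, pvSent, hterm]

theorem pvA_flat (min : Int) (scene : List String) :
    ∀ (st : List String × List Char),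
      scene.foldl
          (fun st line =>
            let st2 := (clean_up_line line).toList.foldl (pvAStep min) st
            (st2.1, st2.2 ++ [' ']))
          st
        = (scene.flatMap (fun line => (clean_up_line line).toList ++ [' '])).foldl (pvAStep min) st := by
  induction scene with
  | nil => intro st; simp
  | cons l t ih =>
    intro st
    simp only [List.foldl_cons, List.flatMap_cons, List.foldl_append]
    rw [ih]
    simp only [List.foldl_nil, pvAStep_space]

theorem pvCuts_enum (t : List Char) :
    ∀ (k : Nat),
      ((PySem.List.enumerate t (k : Int)).filter (fun p => p.2 == '.' || p.2 == '?' || p.2 == '!')).map (·.1)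
        = (pvCuts k t).map (fun (n : Nat) => (n : Int)) := by
  induction t with
  | nil => intro k; simp [PySem.List.enumerate_nil, pvCuts]
  | cons c rest ih =>
    intro k
    by_cases hterm : (c == '.' || c == '?' || c == '!') = true
    · have h1 : ((k : Int) + 1) = ((k + 1 : Nat) : Int) := by push_cast; ring
      rw [PySem.List.enumerate_cons, List.filter_cons_of_pos (by simpa using hterm)]
      simp only [pvCuts, if_pos hterm, List.map_cons]
      rw [h1, ih]
    · have h1 : ((k : Int) + 1) = ((k + 1 : Nat) : Int) := by push_cast; ring
      rw [PySem.List.enumerate_cons, List.filter_cons_of_neg (by simpa using hterm)]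
      simp only [pvCuts, if_neg hterm]
      rw [h1, ih]

theorem pvBStep_foldl (full : List Char) (min : Int) (suffix : List Char) :
    ∀ (pos prev : Nat) (out : List String),
      prev ≤ pos → pos + suffix.length = full.length → full.drop pos = suffix →
      (((pvCuts pos suffix).map (fun (n : Nat) => (n : Int))).foldl (pvBStep full min) (out, (prev : Int))).1
        = out ++ pvSent min ((full.drop prev).take (pos - prev)) suffix := by
  induction suffix with
  | nil => intro pos prev out _ _ _; simp [pvSent, pvCuts]
  | cons c rest ih =>
    intro pos prev out hle hlen hdrop
    have hposlt : pos < full.length := by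
      have := congrArg List.length hdrop
      simp [List.length_drop] at this
      omega
    have hdrop1 : full.drop (pos + 1) = rest := by
      have : full.drop (pos + 1) = (full.drop pos).drop 1 := by
        rw [List.drop_drop]
      rw [this, hdrop]; simp
    have hget : full[pos]? = some c := by
      have h0 : (full.drop pos)[0]? = some c := by rw [hdrop]; rfl
      rw [List.getElem?_drop] at h0
      simpa using h0
    -- the buffer so far and its extension by c
    have hbuflen : ((full.drop prev).take (pos - prev)).length = pos - prev := by
      simp [List.length_take, List.length_drop]
      omega
    have hbufsucc : ∀ q : Nat, q ≤ pos →
        (full.drop q).take (pos + 1 - q) = (full.drop q).take (pos - q) ++ [c] := by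
      intro q hq
      have h1 : pos + 1 - q = (pos - q) + 1 := by omega
      rw [h1, List.take_succ]
      have : (full.drop q)[pos - q]? = some c := by
        rw [List.getElem?_drop]
        have : q + (pos - q) = pos := by omega
        rw [this, hget]
      simp [this]
    by_cases hterm : (c == '.' || c == '?' || c == '!') = true
    · have hcuts : pvCuts pos (c :: rest) = pos :: pvCuts (pos + 1) rest := by
        simp [pvCuts, hterm]
      by_cases hmin : min ≤ ((pos : Int) + 1 - (prev : Int))
      · have hseg : PySem.List.slice full (some (prev : Int)) (some ((pos : Int) + 1))
            = (full.drop prev).take (pos + 1 - prev) := by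
          have h1 : ((pos : Int) + 1) = ((pos + 1 : Nat) : Int) := by push_cast; ring
          rw [h1, PySem.List.slice_natCast]
        have hstep : pvBStep full min (out, (prev : Int)) (pos : Int)
            = (out ++ [String.mk (PySem.Chars.strip
                (if PySem.Chars.isdigit (((full.drop prev).take (pos - prev) ++ [c]).headD ' ')
                 then ((full.drop prev).take (pos - prev) ++ [c]).drop 1
                 else (full.drop prev).take (pos - prev) ++ [c]))], (pos : Int) + 1) := by
          simp only [pvBStep, if_pos hmin, hseg, hbufsucc prev hle]
        have hmin' : min ≤ ((((full.drop prev).take (pos - prev)).length : Int) + 1) := by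
          rw [hbuflen]; push_cast [Nat.cast_sub hle]; omega
        have h1 : ((pos : Int) + 1) = ((pos + 1 : Nat) : Int) := by push_cast; ring
        rw [hcuts]
        simp only [List.map_cons, List.foldl_cons, hstep, h1]
        rw [ih (pos + 1) (pos + 1) _ (le_refl _) (by simp at hlen; omega) hdrop1]
        simp only [pvSent, hterm, if_true, if_pos hmin', Nat.sub_self,
          List.take_zero, List.append_assoc, List.singleton_append]
      · have hstep : pvBStep full min (out, (prev : Int)) (pos : Int) = (out, (prev : Int)) := by
          simp only [pvBStep, if_neg hmin]
        have hmin' : ¬ min ≤ ((((full.drop prev).take (pos - prev)).length : Int) + 1) := by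
          rw [hbuflen]; push_cast [Nat.cast_sub hle]; omega
        rw [hcuts]
        simp only [List.map_cons, List.foldl_cons, hstep]
        rw [ih (pos + 1) prev _ (by omega) (by simp at hlen; omega) hdrop1]
        simp only [pvSent, hterm, if_true, if_neg hmin', hbufsucc prev hle]
    · have hcuts : pvCuts pos (c :: rest) = pvCuts (pos + 1) rest := by
        simp [pvCuts, hterm]
      rw [hcuts, ih (pos + 1) prev _ (by omega) (by simp at hlen; omega) hdrop1]
      simp only [pvSent, if_neg hterm, hbufsucc prev hle]

-- ===== VERDICT (by name: the statement is the Claim_ definition above) =====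
theorem clean_up_scenes_spec : Claim_equal_clean_up_scenes := by
  intro scene min _
  unfold Spec_clean_up_scenes clean_up_scenes clean_up_scenes_alt
  dsimp only
  rw [pvA_flat, pvAStep_foldl, PySem.List.foldl_append_eq_flatMap, List.nil_append, List.nil_append]
  have hB := pvBStep_foldl (scene.flatMap (fun line => (clean_up_line line).toList ++ [' '])) min
      (scene.flatMap (fun line => (clean_up_line line).toList ++ [' '])) 0 0 []
      (le_refl 0) (by simp) (by simp)
  have hC := pvCuts_enum (scene.flatMap (fun line => (clean_up_line line).toList ++ [' '])) 0
  simp only [Nat.cast_zero, List.drop_zero, List.nil_append] at hB hC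
  rw [hC, hB]
  simp
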